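-- pv_equiv track=rewrite | github.com/sueszli/vector-database-benchmark | dataset/python-mutated/build_main.py | _get_module_collection_mode
-- ===== SOURCE A (Python) =====
-- import enum
--
-- class _ModuleCollectionMode(enum.IntFlag):
--     """
--     Module collection mode flags.
--     """
--     PYZ = enum.auto()
--     PYC = enum.auto()
--     PY = enum.auto()
--
-- _MODULE_COLLECTION_MODES = {'pyz': _ModuleCollectionMode.PYZ, 'pyc': _ModuleCollectionMode.PYC, 'py': _ModuleCollectionMode.PY, 'pyz+py': _ModuleCollectionMode.PYZ | _ModuleCollectionMode.PY, 'py+pyz': _ModuleCollectionMode.PYZ | _ModuleCollectionMode.PY}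
--
-- def _get_module_collection_mode(mode_dict, name, noarchive=False):
--     if False:
--         while True:
--             i = 10
--     '\n    Determine the module/package collection mode for the given module name, based on the provided collection\n    mode settings dictionary.\n    '
--     mode_flags = _ModuleCollectionMode.PYC if noarchive else _ModuleCollectionMode.PYZ
--     if not mode_dict:
--         return mode_flags
--     mode = 'pyz'
--     name_parts = name.split('.')
--     for i in range(len(name_parts)):
--         modlevel = '.'.join(name_parts[:i + 1])
--         modlevel_mode = mode_dict.get(modlevel, None)
--         if modlevel_mode is not None:
--             mode = modlevel_mode
--     try:
--         mode_flags = _MODULE_COLLECTION_MODES[mode]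
--     except KeyError:
--         raise ValueError(f'Unknown module collection mode for {name!r}: {mode!r}!')
--     if noarchive and _ModuleCollectionMode.PYZ in mode_flags:
--         mode_flags ^= _ModuleCollectionMode.PYZ
--         mode_flags |= _ModuleCollectionMode.PYC
--     return mode_flags
-- ===== SOURCE B (Python) =====
-- import enum
--
-- class _ModuleCollectionMode(enum.IntFlag):
--     """
--     Module collection mode flags.
--     """
--     PYZ = enum.auto()
--     PYC = enum.auto()
--     PY = enum.auto()
--
-- _MODULE_COLLECTION_MODES = {'pyz': _ModuleCollectionMode.PYZ, 'pyc': _ModuleCollectionMode.PYC, 'py': _ModuleCollectionMode.PY, 'pyz+py': _ModuleCollectionMode.PYZ | _ModuleCollectionMode.PY, 'py+pyz': _ModuleCollectionMode.PYZ | _ModuleCollectionMode.PY}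
--
-- def _get_module_collection_mode(mode_dict, name, noarchive=False):
--     mode_flags = _ModuleCollectionMode.PYC if noarchive else _ModuleCollectionMode.PYZ
--     if not mode_dict:
--         return mode_flags
--     # Scan the settings dictionary itself (not the name's prefix levels): a key applies
--     # iff it is a dotted prefix of the name, i.e. name+'.' starts with key+'.'; the
--     # longest applicable key decides the mode.
--     dotted = name + '.'
--     mode = 'pyz'
--     best = -1
--     for key, value in mode_dict.items():
--         if len(key) > best and dotted.startswith(key + '.'):
--             mode = value
--             best = len(key)
--     try:
--         mode_flags = _MODULE_COLLECTION_MODES[mode]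
--     except KeyError:
--         raise ValueError(f'Unknown module collection mode for {name!r}: {mode!r}!')
--     if noarchive and _ModuleCollectionMode.PYZ in mode_flags:
--         mode_flags ^= _ModuleCollectionMode.PYZ
--         mode_flags |= _ModuleCollectionMode.PYC
--     return mode_flags
-- ===== Notes on version B (the rewrite author's own statement) =====
-- stated objective: alternative
-- what changed: A iterates over the name's dot-levels, re-joining each prefix and looking it up in the dict (last hit wins); B never enumerates prefixes: it makes one pass over the dict's own entries, testing each key with a single dotted-prefix string comparison (name+'.').startswith(key+'.') and keeping the longest applicable key.
import Mathlib
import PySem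

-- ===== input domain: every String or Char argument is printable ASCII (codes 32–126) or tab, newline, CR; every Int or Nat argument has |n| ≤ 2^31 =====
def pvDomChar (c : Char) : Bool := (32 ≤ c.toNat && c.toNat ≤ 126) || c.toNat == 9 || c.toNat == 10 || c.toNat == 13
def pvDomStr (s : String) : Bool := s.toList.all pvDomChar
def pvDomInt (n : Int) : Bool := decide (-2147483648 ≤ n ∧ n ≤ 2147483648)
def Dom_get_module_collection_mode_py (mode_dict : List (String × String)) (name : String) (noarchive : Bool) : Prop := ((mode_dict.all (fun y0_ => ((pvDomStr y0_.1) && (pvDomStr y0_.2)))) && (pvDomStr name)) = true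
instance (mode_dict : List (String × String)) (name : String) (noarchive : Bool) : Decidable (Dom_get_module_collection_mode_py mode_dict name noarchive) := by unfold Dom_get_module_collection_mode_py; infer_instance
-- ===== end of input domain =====

-- B never enumerates the name's dot-level prefixes: it scans the dict's own entries once,
-- testing each key with a single dotted-prefix comparison and keeping the longest hit;
-- alternative algorithm, no speed claim.

-- module constant _MODULE_COLLECTION_MODES (flag values: PYZ=1, PYC=2, PY=4)
def pvModes : PySem.Dict String Int :=
  PySem.Dict.mk [("pyz", 1), ("pyc", 2), ("py", 4), ("pyz+py", 5), ("py+pyz", 5)]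

-- ===== PORT A =====
def get_module_collection_mode_py (mode_dict : List (String × String)) (name : String) (noarchive : Bool) : Int :=
  let mode_flags : Int := if noarchive then 2 else 1
  if mode_dict.isEmpty then mode_flags
  else
    let name_parts := (PySem.Str.split? name ".").getD []
    let mode := (List.range name_parts.length).foldl
      (fun mode i =>
        let modlevel := PySem.Str.join "." (name_parts.take (i + 1))
        match PySem.Dict.get? (PySem.Dict.mk mode_dict) modlevel with
        | some modlevel_mode => modlevel_mode
        | none => mode) "pyz"
    -- _MODULE_COLLECTION_MODES[mode]; the KeyError→ValueError raise is excluded by Pre_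
    let mode_flags := PySem.Dict.getD pvModes mode 0
    -- 'PYZ in mode_flags' on an IntFlag is the bit test mode_flags & 1 == 1
    if noarchive && (PySem.Int.band mode_flags 1 == 1) then
      PySem.Int.bor (PySem.Int.bxor mode_flags 1) 2
    else mode_flags

-- ===== PORT B =====
def get_module_collection_mode_py_alt (mode_dict : List (String × String)) (name : String) (noarchive : Bool) : Int :=
  let mode_flags : Int := if noarchive then 2 else 1
  if mode_dict.isEmpty then mode_flags
  else
    let dotted := name ++ "."
    -- one pass over the dict's entries; state = (mode, best): longest applicable key wins
    let st := mode_dict.foldl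
      (fun st kv =>
        if decide (PySem.Str.len kv.1 > st.2) && PySem.Str.startswith dotted (kv.1 ++ ".")
        then (kv.2, PySem.Str.len kv.1) else st)
      ("pyz", (-1 : Int))
    let mode := st.1
    -- _MODULE_COLLECTION_MODES[mode]; the KeyError→ValueError raise is excluded by Pre_
    let mode_flags := PySem.Dict.getD pvModes mode 0
    if noarchive && (PySem.Int.band mode_flags 1 == 1) then
      PySem.Int.bor (PySem.Int.bxor mode_flags 1) 2
    else mode_flags

-- ===== PRECONDITION & SPEC =====
def pvValidMode (m : String) : Bool :=
  m == "pyz" || m == "pyc" || m == "py" || m == "pyz+py" || m == "py+pyz"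

-- Pre_ excludes exactly the inputs on which Python A raises ValueError: those where the
-- DECIDING dotted prefix of `name` — the longest one present in mode_dict — is mapped to a
-- string outside the five known modes (an invalid value at a shorter, shadowed prefix stays
-- inside Pre_; A returns normally there and B matches it).
def Pre_get_module_collection_mode_py (mode_dict : List (String × String)) (name : String) (noarchive : Bool) : Prop :=
  ∀ p ∈ (List.range ((PySem.Str.split? name ".").getD []).length).map
      (fun i => PySem.Str.join "." (((PySem.Str.split? name ".").getD []).take (i + 1))),
    ((PySem.Dict.get? (PySem.Dict.mk mode_dict) p).all pvValidMode = true) ∨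
    ∃ q ∈ (List.range ((PySem.Str.split? name ".").getD []).length).map
        (fun i => PySem.Str.join "." (((PySem.Str.split? name ".").getD []).take (i + 1))),
      PySem.Str.len p < PySem.Str.len q ∧ (PySem.Dict.get? (PySem.Dict.mk mode_dict) q) ≠ none
instance (mode_dict : List (String × String)) (name : String) (noarchive : Bool) : Decidable (Pre_get_module_collection_mode_py mode_dict name noarchive) := by unfold Pre_get_module_collection_mode_py; infer_instance

def pvWitness_get_module_collection_mode_py : (List (String × String)) × String × Bool :=
  ([("a", "py")], "a.b", false)

def Spec_get_module_collection_mode_py (mode_dict : List (String × String)) (name : String) (noarchive : Bool) (out : Int) : Prop := out = get_module_collection_mode_py_alt mode_dict name noarchive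
instance (mode_dict : List (String × String)) (name : String) (noarchive : Bool) (out : Int) : Decidable (Spec_get_module_collection_mode_py mode_dict name noarchive out) := by unfold Spec_get_module_collection_mode_py; infer_instance

-- ===== CLAIM (what is proved, stated in full; the proofs are below) =====
def Claim_equal_get_module_collection_mode_py : Prop := ∀ (mode_dict : List (String × String)) (name : String) (noarchive : Bool), Dom_get_module_collection_mode_py mode_dict name noarchive → Pre_get_module_collection_mode_py mode_dict name noarchive → Spec_get_module_collection_mode_py mode_dict name noarchive (get_module_collection_mode_py mode_dict name noarchive)

-- ===== LEMMAS AND PROOFS =====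

-- structural model of Python's s.split('.') on char lists
def pvConsHead (c : Char) : List (List Char) → List (List Char)
  | [] => [[c]]
  | p :: ps => (c :: p) :: ps

def pvSplitDot : List Char → List (List Char)
  | [] => [[]]
  | c :: rest => if c = '.' then [] :: pvSplitDot rest else pvConsHead c (pvSplitDot rest)

def pvWithHead (pre : List Char) : List (List Char) → List (List Char)
  | [] => [pre]
  | p :: ps => (pre ++ p) :: ps

theorem pvSplitDot_ne_nil (cs : List Char) : pvSplitDot cs ≠ [] := by
  cases cs with
  | nil => simp [pvSplitDot]
  | cons c rest =>
    simp only [pvSplitDot]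
    split
    · simp
    · cases h : pvSplitDot rest <;> simp [pvConsHead]

theorem pvSplitDot_go (fuel : Nat) (l cur : List Char) (acc : List (List Char))
    (h : l.length < fuel) :
    PySem.Chars.splitOn.go ['.'] fuel l cur acc
      = acc.reverse ++ pvWithHead cur.reverse (pvSplitDot l) := by
  induction fuel generalizing l cur acc with
  | zero => omega
  | succ f ih =>
    cases l with
    | nil =>
      simp [PySem.Chars.splitOn.go, pvSplitDot, pvWithHead]
    | cons c rest =>
      rw [PySem.Chars.splitOn.go]
      by_cases hc : c = '.'
      · subst hc
        have hpre : ['.'].isPrefixOf ('.' :: rest) = true := by simp [List.isPrefixOf]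
        simp only [hpre, if_pos, List.length_cons, List.length_nil, List.drop_succ_cons,
          List.drop_zero]
        rw [ih rest [] (cur.reverse :: acc) (by simpa using Nat.lt_of_succ_lt_succ h)]
        simp only [pvSplitDot]
        obtain ⟨p, ps, hps⟩ : ∃ p ps, pvSplitDot rest = p :: ps := by
          cases hx : pvSplitDot rest with
          | nil => exact absurd hx (pvSplitDot_ne_nil rest)
          | cons p ps => exact ⟨p, ps, rfl⟩
        simp [hps, pvWithHead]
      · have hpre : ['.'].isPrefixOf (c :: rest) = false := by
          simp [List.isPrefixOf]
          exact fun h' => absurd h'.symm hc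
        simp only [hpre, Bool.false_eq_true, if_false]
        rw [ih rest (c :: cur) acc (by simpa using Nat.lt_of_succ_lt_succ h)]
        simp only [pvSplitDot, if_neg hc]
        obtain ⟨p, ps, hps⟩ : ∃ p ps, pvSplitDot rest = p :: ps := by
          cases hx : pvSplitDot rest with
          | nil => exact absurd hx (pvSplitDot_ne_nil rest)
          | cons p ps => exact ⟨p, ps, rfl⟩
        simp [hps, pvWithHead, pvConsHead]

theorem pvSplitOn_eq (cs : List Char) : PySem.Chars.splitOn cs ['.'] = pvSplitDot cs := by
  rw [PySem.Chars.splitOn, pvSplitDot_go cs.length.succ cs [] [] (Nat.lt_succ_self _)]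
  obtain ⟨p, ps, hps⟩ : ∃ p ps, pvSplitDot cs = p :: ps := by
    cases hx : pvSplitDot cs with
    | nil => exact absurd hx (pvSplitDot_ne_nil cs)
    | cons p ps => exact ⟨p, ps, rfl⟩
  simp [hps, pvWithHead]

theorem pvSplitDot_no_dot (cs : List Char) : ∀ p ∈ pvSplitDot cs, '.' ∉ p := by
  induction cs with
  | nil => simp [pvSplitDot]
  | cons c rest ih =>
    simp only [pvSplitDot]
    split
    · intro p hp
      rcases List.mem_cons.mp hp with hp | hp
      · simp [hp]
      · exact ih p hp
    · rename_i hc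
      obtain ⟨q, qs, hqs⟩ : ∃ q qs, pvSplitDot rest = q :: qs := by
        cases hx : pvSplitDot rest with
        | nil => exact absurd hx (pvSplitDot_ne_nil rest)
        | cons q qs => exact ⟨q, qs, rfl⟩
      rw [hqs]
      intro p hp
      rcases List.mem_cons.mp hp with hp | hp
      · subst hp
        intro hmem
        rcases List.mem_cons.mp hmem with hmem | hmem
        · exact hc hmem.symm
        · exact ih q (by simp [hqs]) hmem
      · exact ih p (by simp [hqs, hp])

-- the generic dotted-prefix characterisation over parts with no '.' inside
theorem pv_join_concat (xs : List (List Char)) (y : List Char) (h : xs ≠ []) :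
    PySem.Chars.join ['.'] (xs ++ [y]) = PySem.Chars.join ['.'] xs ++ '.' :: y := by
  induction xs with
  | nil => exact absurd rfl h
  | cons x rest ih =>
    cases rest with
    | nil => simp [PySem.Chars.join_cons_cons, PySem.Chars.join_singleton]
    | cons x' rest' =>
      rw [List.cons_append, List.cons_append, PySem.Chars.join_cons_cons,
        ← List.cons_append, ih (by simp), PySem.Chars.join_cons_cons]
      simp

theorem pv_short_prefix (k p t : List Char) (hnd : '.' ∉ p)
    (hpre : (k ++ ['.']) <+: (p ++ '.' :: t)) (hlen : k.length < p.length) : False := by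
  have h1 : (k ++ ['.'])[k.length]'(by simp) = '.' := List.getElem_concat_length rfl _
  have h2 : (k ++ ['.'])[k.length]'(by simp) = (p ++ '.' :: t)[k.length]'(by simp; omega) :=
    hpre.getElem (by simp)
  have h3 : (p ++ '.' :: t)[k.length]'(by simp; omega) = p[k.length]'hlen :=
    List.getElem_append_left hlen
  have h4 : p[k.length]'hlen = '.' := h3.symm.trans (h2.symm.trans h1)
  exact hnd (h4 ▸ List.getElem_mem hlen)

theorem pv_prefix_eq_of_length (k p t : List Char)
    (hpre : (k ++ ['.']) <+: (p ++ t)) (hlen : k.length = p.length) : k = p := by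
  have hk : k <+: p ++ t := (List.prefix_append k ['.']).trans hpre
  have hp : p <+: p ++ t := List.prefix_append p t
  exact (List.prefix_of_prefix_length_le hk hp (le_of_eq hlen)).eq_of_length hlen

theorem pvG (ps : List (List Char)) (hne : ps ≠ []) (hnd : ∀ p ∈ ps, '.' ∉ p)
    (k : List Char) :
    ((k ++ ['.']) <+: (PySem.Chars.join ['.'] ps ++ ['.'])) ↔
      ∃ i < ps.length, k = PySem.Chars.join ['.'] (ps.take (i + 1)) := by
  induction ps generalizing k with
  | nil => exact absurd rfl hne
  | cons p rest ih =>
    cases rest with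
    | nil =>
      rw [PySem.Chars.join_singleton]
      constructor
      · intro hpre
        refine ⟨0, by simp, ?_⟩
        rcases Nat.lt_trichotomy k.length p.length with h | h | h
        · exact absurd (hpre) (fun hpre' => pv_short_prefix k p [] (hnd p (by simp))
            (by simpa using hpre') h)
        · simp only [List.take_succ_cons, List.take_zero, PySem.Chars.join_singleton]
          exact pv_prefix_eq_of_length k p ['.'] hpre h
        · have := hpre.length_le
          simp at this
          omega
      · rintro ⟨i, hi, hk⟩
        simp only [List.take_succ_cons, List.take_nil, PySem.Chars.join_singleton] at hk
        subst hk
        exact List.prefix_refl _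
    | cons q rest' =>
      rw [PySem.Chars.join_cons_cons]
      have hJ : (p ++ ['.'] ++ PySem.Chars.join ['.'] (q :: rest')) ++ ['.']
          = p ++ '.' :: (PySem.Chars.join ['.'] (q :: rest') ++ ['.']) := by
        simp
      have ih' := ih (by simp) (fun r hr => hnd r (List.mem_cons_of_mem _ hr))
      constructor
      · intro hpre
        rw [hJ] at hpre
        rcases Nat.lt_trichotomy k.length p.length with h | h | h
        · exact absurd hpre (fun hpre' => pv_short_prefix k p _ (hnd p (by simp)) hpre' h)
        · refine ⟨0, by simp, ?_⟩
          simp only [List.take_succ_cons, List.take_zero, PySem.Chars.join_singleton]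
          exact pv_prefix_eq_of_length k p _ hpre h
        · have hkbig : k <+: p ++ '.' :: (PySem.Chars.join ['.'] (q :: rest') ++ ['.']) :=
            (List.prefix_append k ['.']).trans hpre
          have hp1 : p ++ ['.'] <+: p ++ '.' :: (PySem.Chars.join ['.'] (q :: rest') ++ ['.']) := by
            rw [show ('.' :: (PySem.Chars.join ['.'] (q :: rest') ++ ['.']))
                = ['.'] ++ (PySem.Chars.join ['.'] (q :: rest') ++ ['.']) from rfl,
              ← List.append_assoc]
            exact List.prefix_append _ _
          have hpk : p ++ ['.'] <+: k :=
            List.prefix_of_prefix_length_le hp1 hkbig (by simp; omega)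
          obtain ⟨k', rfl⟩ := hpk
          have hpre2 : (k' ++ ['.']) <+: (PySem.Chars.join ['.'] (q :: rest') ++ ['.']) := by
            rw [show p ++ ['.'] ++ k' ++ ['.'] = (p ++ ['.']) ++ (k' ++ ['.']) by simp,
              show p ++ '.' :: (PySem.Chars.join ['.'] (q :: rest') ++ ['.'])
                = (p ++ ['.']) ++ (PySem.Chars.join ['.'] (q :: rest') ++ ['.']) by simp] at hpre
            exact (List.prefix_append_right_inj _).mp hpre
          obtain ⟨i, hi, hk'⟩ := (ih' k').mp hpre2
          refine ⟨i + 1, by simpa using Nat.succ_lt_succ hi, ?_⟩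
          rw [List.take_succ_cons, List.take_succ_cons, PySem.Chars.join_cons_cons,
            ← List.take_succ_cons, ← hk']
      · rintro ⟨i, hi, rfl⟩
        rw [hJ]
        cases i with
        | zero =>
          simp only [List.take_succ_cons, List.take_zero, PySem.Chars.join_singleton]
          rw [show ('.' :: (PySem.Chars.join ['.'] (q :: rest') ++ ['.']))
              = ['.'] ++ (PySem.Chars.join ['.'] (q :: rest') ++ ['.']) from rfl,
            ← List.append_assoc]
          exact List.prefix_append _ _
        | succ j =>
          have hj : j < (q :: rest').length := by simpa using hi
          have hpre2 := (ih' (PySem.Chars.join ['.'] ((q :: rest').take (j + 1)))).mpr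
            ⟨j, hj, rfl⟩
          rw [List.take_succ_cons, List.take_succ_cons, PySem.Chars.join_cons_cons,
            ← List.take_succ_cons]
          rw [show p ++ ['.'] ++ PySem.Chars.join ['.'] ((q :: rest').take (j + 1)) ++ ['.']
              = (p ++ ['.']) ++ (PySem.Chars.join ['.'] ((q :: rest').take (j + 1)) ++ ['.']) by simp,
            show p ++ '.' :: (PySem.Chars.join ['.'] (q :: rest') ++ ['.'])
              = (p ++ ['.']) ++ (PySem.Chars.join ['.'] (q :: rest') ++ ['.']) by simp]
          exact ((List.prefix_append_right_inj _).mpr hpre2)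

-- B's fold: no applicable entry above the bound leaves the state unchanged
theorem pv_fold_frozen (dotted : String) (d : List (String × String)) (m : String) (b : Int)
    (h : ∀ kv ∈ d, PySem.Str.startswith dotted (kv.1 ++ ".") = true → PySem.Str.len kv.1 ≤ b) :
    d.foldl
      (fun st kv =>
        if decide (PySem.Str.len kv.1 > st.2) && PySem.Str.startswith dotted (kv.1 ++ ".")
        then (kv.2, PySem.Str.len kv.1) else st) (m, b) = (m, b) := by
  induction d with
  | nil => rfl
  | cons kv rest ih =>
    simp only [List.foldl_cons]
    have hcond : (decide (PySem.Str.len kv.1 > b) && PySem.Str.startswith dotted (kv.1 ++ ".")) = false := by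
      cases hsw : PySem.Str.startswith dotted (kv.1 ++ ".") with
      | false => simp
      | true =>
        have := h kv (by simp) hsw
        simp only [Bool.and_true, decide_eq_false_iff_not]
        omega
    rw [hcond]
    simp only [Bool.false_eq_true, if_false]
    exact ih (fun kv hkv hsw => h kv (List.mem_cons_of_mem _ hkv) hsw)

-- B's fold returns the value of the longest applicable key
theorem pv_fold_spec (dotted : String) (d : List (String × String)) (m : String) (b : Int)
    (pstar : String) (vstar : String)
    (hget : PySem.Dict.get? (PySem.Dict.mk d) pstar = some vstar)
    (hmatch : PySem.Str.startswith dotted (pstar ++ ".") = true)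
    (hb : b < PySem.Str.len pstar)
    (hmax : ∀ kv ∈ d, PySem.Str.startswith dotted (kv.1 ++ ".") = true →
      PySem.Str.len kv.1 ≤ PySem.Str.len pstar ∧ (PySem.Str.len kv.1 = PySem.Str.len pstar → kv.1 = pstar)) :
    (d.foldl
      (fun st kv =>
        if decide (PySem.Str.len kv.1 > st.2) && PySem.Str.startswith dotted (kv.1 ++ ".")
        then (kv.2, PySem.Str.len kv.1) else st) (m, b)).1 = vstar := by
  induction d generalizing m b with
  | nil => simp [PySem.Dict.get?] at hget
  | cons kv rest ih =>
    rw [show PySem.Dict.mk (kv :: rest) = { items := kv :: rest } from rfl,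
      PySem.Dict.get?_mk_cons] at hget
    simp only [List.foldl_cons]
    by_cases hk : kv.1 = pstar
    · have hbeq : (kv.1 == pstar) = true := beq_iff_eq.mpr hk
      rw [hbeq] at hget
      simp only [if_pos] at hget
      have hv : kv.2 = vstar := by injection hget
      have hcond : (decide (PySem.Str.len kv.1 > b) && PySem.Str.startswith dotted (kv.1 ++ ".")) = true := by
        rw [hk]
        simp only [hmatch, Bool.and_true, decide_eq_true_eq]
        exact hb
      rw [hcond]
      simp only [if_pos]
      rw [pv_fold_frozen dotted rest kv.2 (PySem.Str.len kv.1)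
        (fun kv' hkv' hsw' => by
          have := (hmax kv' (List.mem_cons_of_mem _ hkv') hsw').1
          rw [hk]; exact this)]
      simpa using hv
    · have hbeq : (kv.1 == pstar) = false := by simp [hk]
      rw [hbeq] at hget
      simp only [Bool.false_eq_true, if_false] at hget
      have hmax' : ∀ kv' ∈ rest, PySem.Str.startswith dotted (kv'.1 ++ ".") = true →
          PySem.Str.len kv'.1 ≤ PySem.Str.len pstar ∧ (PySem.Str.len kv'.1 = PySem.Str.len pstar → kv'.1 = pstar) :=
        fun kv' hkv' hsw' => hmax kv' (List.mem_cons_of_mem _ hkv') hsw'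
      cases hcond : (decide (PySem.Str.len kv.1 > b) && PySem.Str.startswith dotted (kv.1 ++ ".")) with
      | false =>
        simp only [Bool.false_eq_true, if_false]
        exact ih m b hget hb hmax'
      | true =>
        simp only [if_pos]
        have hsw : PySem.Str.startswith dotted (kv.1 ++ ".") = true := by
          exact (Bool.and_elim_right hcond)
        have hlt : PySem.Str.len kv.1 < PySem.Str.len pstar := by
          rcases hmax kv (by simp) hsw with ⟨hle, heq⟩
          rcases lt_or_eq_of_le hle with h | h
          · exact h
          · exact absurd (heq h) hk
        exact ih kv.2 (PySem.Str.len kv.1) hget hlt hmax'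

-- A's overwrite fold (last match wins) is the reversed-list first match
theorem pv_foldl_eq_findSome_reverse (mode_dict : List (String × String)) (ps : List String) (d : String) :
    ps.foldl
      (fun mode p =>
        match PySem.Dict.get? (PySem.Dict.mk mode_dict) p with
        | some m => m
        | none => mode) d
    = (ps.reverse.findSome? (PySem.Dict.get? (PySem.Dict.mk mode_dict))).getD d := by
  induction ps generalizing d with
  | nil => simp
  | cons p rest ih =>
    simp only [List.foldl_cons, List.reverse_cons, List.findSome?_append, ih]
    cases h : PySem.Dict.get? (PySem.Dict.mk mode_dict) p <;>
      cases h2 : rest.reverse.findSome? (PySem.Dict.get? (PySem.Dict.mk mode_dict)) <;>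
        simp [h, Option.or]

theorem pv_findSome_eq_bind_find {α β : Type} (f : α → Option β) (l : List α) :
    l.findSome? f = (l.find? (fun x => (f x).isSome)).bind f := by
  induction l with
  | nil => simp
  | cons x rest ih =>
    simp only [List.findSome?_cons, List.find?_cons]
    cases h : f x <;> simp [h, ih]

theorem pv_get?_mem (d : List (String × String)) (k : String) (v : String)
    (h : PySem.Dict.get? (PySem.Dict.mk d) k = some v) : (k, v) ∈ d := by
  induction d with
  | nil => simp [PySem.Dict.get?] at h
  | cons kv rest ih =>
    rw [show PySem.Dict.mk (kv :: rest) = { items := kv :: rest } from rfl] at h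
    cases kv with
    | mk k' v' =>
      rw [PySem.Dict.get?_mk_cons] at h
      by_cases hk : k' == k
      · simp [hk] at h; simp [h, (beq_iff_eq.mp hk)]
      · simp [hk] at h
        exact List.mem_cons_of_mem _ (ih h)

theorem pv_mem_get?_isSome (d : List (String × String)) (k : String) (v : String)
    (h : (k, v) ∈ d) : (PySem.Dict.get? (PySem.Dict.mk d) k).isSome = true := by
  induction d with
  | nil => simp at h
  | cons kv rest ih =>
    rw [show PySem.Dict.mk (kv :: rest) = { items := kv :: rest } from rfl]
    cases kv with
    | mk k' v' =>
      rw [PySem.Dict.get?_mk_cons]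
      by_cases hk : k' == k
      · simp [hk]
      · simp only [hk, Bool.false_eq_true, if_false]
        rcases List.mem_cons.mp h with h1 | h1
        · cases h1; simp at hk
        · exact ih h1

-- split/join round trip and the String-level prefix list
theorem pv_join_splitDot (cs : List Char) :
    PySem.Chars.join ['.'] (pvSplitDot cs) = cs := by
  induction cs with
  | nil => simp [pvSplitDot, PySem.Chars.join_singleton]
  | cons c rest ih =>
    obtain ⟨p, ps, hps⟩ : ∃ p ps, pvSplitDot rest = p :: ps := by
      cases hx : pvSplitDot rest with
      | nil => exact absurd hx (pvSplitDot_ne_nil rest)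
      | cons p ps => exact ⟨p, ps, rfl⟩
    by_cases hc : c = '.'
    · subst hc
      have hsd : pvSplitDot ('.' :: rest) = [] :: pvSplitDot rest := by simp [pvSplitDot]
      rw [hsd, hps, PySem.Chars.join_cons_cons, ← hps, ih]
      simp
    · have hsd : pvSplitDot (c :: rest) = pvConsHead c (pvSplitDot rest) := by
        simp [pvSplitDot, hc]
      rw [hsd, hps, pvConsHead]
      cases ps with
      | nil =>
        rw [PySem.Chars.join_singleton]
        rw [hps, PySem.Chars.join_singleton] at ih
        simp [ih]
      | cons p' ps' =>
        rw [PySem.Chars.join_cons_cons, List.cons_append, List.cons_append,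
          ← PySem.Chars.join_cons_cons, ← hps, ih]

theorem pv_parts_eq (name : String) :
    (PySem.Str.split? name ".").getD [] = (pvSplitDot name.toList).map String.ofList := by
  rw [PySem.Str.split?]
  have hsep : ("." : String).toList = ['.'] := rfl
  rw [hsep, PySem.Chars.split?]
  simp [pvSplitOn_eq]

def pvPrefs (name : String) : List String :=
  (List.range ((PySem.Str.split? name ".").getD []).length).map
    (fun i => PySem.Str.join "." (((PySem.Str.split? name ".").getD []).take (i + 1)))

theorem pv_prefs_eq (name : String) :
    pvPrefs name = (List.range (pvSplitDot name.toList).length).map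
      (fun i => String.ofList (PySem.Chars.join ['.'] ((pvSplitDot name.toList).take (i + 1)))) := by
  unfold pvPrefs
  rw [pv_parts_eq, List.length_map]
  refine List.map_congr_left (fun i _ => ?_)
  rw [← String.toList_inj, PySem.Str.toList_join, String.toList_ofList, ← List.map_take,
    List.map_map]
  have : (String.toList ∘ String.ofList) = id := by
    funext l; simp
  rw [this, List.map_id, String.toList_ofList]

theorem pv_mem_prefs (name : String) (k : String) :
    k ∈ pvPrefs name ↔ PySem.Str.startswith (name ++ ".") (k ++ ".") = true := by
  rw [PySem.Str.startswith_eq, PySem.Chars.startswith_iff]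
  have hdot : ("." : String).toList = ['.'] := rfl
  rw [String.toList_append, String.toList_append, hdot]
  rw [show name.toList = PySem.Chars.join ['.'] (pvSplitDot name.toList) from
    (pv_join_splitDot name.toList).symm]
  rw [pvG (pvSplitDot name.toList) (pvSplitDot_ne_nil _) (pvSplitDot_no_dot _) k.toList]
  rw [pv_prefs_eq]
  simp only [List.mem_map, List.mem_range]
  constructor
  · rintro ⟨i, hi, rfl⟩
    exact ⟨i, hi, by rw [String.toList_ofList]⟩
  · rintro ⟨i, hi, hk⟩
    refine ⟨i, hi, ?_⟩
    rw [← String.toList_inj, String.toList_ofList]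
    exact hk.symm

theorem pv_len_mono (cs : List Char) (i j : Nat) (hij : i < j) (hj : j < (pvSplitDot cs).length) :
    (PySem.Chars.join ['.'] ((pvSplitDot cs).take (i + 1))).length
      < (PySem.Chars.join ['.'] ((pvSplitDot cs).take (j + 1))).length := by
  have hstep : ∀ t, t + 1 < (pvSplitDot cs).length →
      (PySem.Chars.join ['.'] ((pvSplitDot cs).take (t + 1))).length
        < (PySem.Chars.join ['.'] ((pvSplitDot cs).take (t + 2))).length := by
    intro t ht
    have htake : (pvSplitDot cs).take (t + 2) =
        (pvSplitDot cs).take (t + 1) ++ [(pvSplitDot cs)[t + 1]'ht] := by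
      rw [List.take_succ]
      congr 1
      rw [List.getElem?_eq_getElem ht]
      rfl
    rw [htake, pv_join_concat _ _ (by
      rw [Ne, List.take_eq_nil_iff]
      push_neg
      exact ⟨by omega, pvSplitDot_ne_nil cs⟩)]
    simp
  induction j with
  | zero => omega
  | succ j ihj =>
    rcases Nat.lt_succ_iff_lt_or_eq.mp hij with h | h
    · exact (ihj h (by omega)).trans (hstep j hj)
    · subst h
      exact hstep i hj

theorem pv_prefs_pairwise (name : String) :
    (pvPrefs name).Pairwise (fun a b => PySem.Str.len a < PySem.Str.len b) := by
  rw [pv_prefs_eq, List.pairwise_map]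
  refine List.Pairwise.imp_of_mem ?_ List.pairwise_lt_range
  intro i j hi hj hij
  rw [List.mem_range] at hj
  have := pv_len_mono name.toList i j hij hj
  simp only [PySem.Str.len, String.toList_ofList]
  exact_mod_cast this

-- ===== VERDICT (by name: the statement is the Claim_ definition above) =====
theorem get_module_collection_mode_py_spec : Claim_equal_get_module_collection_mode_py := by
  intro d name na _ _
  unfold Spec_get_module_collection_mode_py
  unfold get_module_collection_mode_py get_module_collection_mode_py_alt
  cases hemp : d.isEmpty with
  | true => simp
  | false =>
    simp only [Bool.false_eq_true, if_false]
    have hA : (List.range ((PySem.Str.split? name ".").getD []).length).foldl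
        (fun mode i =>
          match PySem.Dict.get? (PySem.Dict.mk d)
              (PySem.Str.join "." (((PySem.Str.split? name ".").getD []).take (i + 1))) with
          | some modlevel_mode => modlevel_mode
          | none => mode) "pyz"
        = ((pvPrefs name).reverse.findSome? (PySem.Dict.get? (PySem.Dict.mk d))).getD "pyz" := by
      have h := pv_foldl_eq_findSome_reverse d (pvPrefs name) "pyz"
      rw [pvPrefs, List.foldl_map] at h
      exact h
    have hmode : (List.range ((PySem.Str.split? name ".").getD []).length).foldl
        (fun mode i =>
          match PySem.Dict.get? (PySem.Dict.mk d)
              (PySem.Str.join "." (((PySem.Str.split? name ".").getD []).take (i + 1))) with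
          | some modlevel_mode => modlevel_mode
          | none => mode) "pyz"
        = (d.foldl
            (fun st kv =>
              if decide (PySem.Str.len kv.1 > st.2) &&
                  PySem.Str.startswith (name ++ ".") (kv.1 ++ ".")
              then (kv.2, PySem.Str.len kv.1) else st) ("pyz", (-1 : Int))).1 := by
      rw [hA]
      by_cases hex : ∃ kv ∈ d, PySem.Str.startswith (name ++ ".") (kv.1 ++ ".") = true
      · obtain ⟨kv0, hkv0, hsw0⟩ := hex
        have hk0 : kv0.1 ∈ pvPrefs name := (pv_mem_prefs name kv0.1).mpr hsw0
        have hsome0 : (PySem.Dict.get? (PySem.Dict.mk d) kv0.1).isSome = true :=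
          pv_mem_get?_isSome d kv0.1 kv0.2 (by simpa using hkv0)
        have hfindsome : ((pvPrefs name).reverse.find?
            (fun p => (PySem.Dict.get? (PySem.Dict.mk d) p).isSome)).isSome = true :=
          List.find?_isSome.mpr ⟨kv0.1, List.mem_reverse.mpr hk0, hsome0⟩
        obtain ⟨pstar, hfind⟩ := Option.isSome_iff_exists.mp hfindsome
        obtain ⟨hps, as, bs, hdecomp, has⟩ := List.find?_eq_some_iff_append.mp hfind
        obtain ⟨vstar, hget⟩ := Option.isSome_iff_exists.mp hps
        have hpmem : pstar ∈ pvPrefs name := by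
          rw [← List.mem_reverse, hdecomp]
          simp
        have hpsw : PySem.Str.startswith (name ++ ".") (pstar ++ ".") = true :=
          (pv_mem_prefs name pstar).mp hpmem
        have hrevpair : (pvPrefs name).reverse.Pairwise
            (fun a b => PySem.Str.len b < PySem.Str.len a) :=
          List.pairwise_reverse.mpr (pv_prefs_pairwise name)
        rw [hdecomp] at hrevpair
        obtain ⟨_, hpb, -⟩ := List.pairwise_append.mp hrevpair
        have hbs : ∀ b ∈ bs, PySem.Str.len b < PySem.Str.len pstar :=
          (List.pairwise_cons.mp hpb).1
        have hmax : ∀ kv ∈ d, PySem.Str.startswith (name ++ ".") (kv.1 ++ ".") = true →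
            PySem.Str.len kv.1 ≤ PySem.Str.len pstar ∧
              (PySem.Str.len kv.1 = PySem.Str.len pstar → kv.1 = pstar) := by
          intro kv hkv hsw
          have hkmem : kv.1 ∈ pvPrefs name := (pv_mem_prefs name kv.1).mpr hsw
          have hksome : (PySem.Dict.get? (PySem.Dict.mk d) kv.1).isSome = true :=
            pv_mem_get?_isSome d kv.1 kv.2 (by simpa using hkv)
          have hkrev : kv.1 ∈ as ++ pstar :: bs := by
            rw [← hdecomp]
            exact List.mem_reverse.mpr hkmem
          rcases List.mem_append.mp hkrev with h | h
          · exact absurd hksome (by simpa using has _ h)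
          · rcases List.mem_cons.mp h with h1 | h1
            · exact ⟨le_of_eq (by rw [h1]), fun _ => h1⟩
            · have hlt := hbs _ h1
              exact ⟨le_of_lt hlt, fun he => by omega⟩
        have hbneg : (-1 : Int) < PySem.Str.len pstar := by
          rw [PySem.Str.len_eq]
          have := Int.natCast_nonneg pstar.toList.length
          omega
        have hBmode := pv_fold_spec (name ++ ".") d "pyz" (-1) pstar vstar hget hpsw hbneg hmax
        have hAmode : ((pvPrefs name).reverse.findSome?
            (PySem.Dict.get? (PySem.Dict.mk d))).getD "pyz" = vstar := by
          rw [pv_findSome_eq_bind_find, hfind]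
          simp [hget]
        rw [hAmode, hBmode]
      · push_neg at hex
        have hB := pv_fold_frozen (name ++ ".") d "pyz" (-1)
          (fun kv hkv hsw => absurd hsw (by simpa using hex kv hkv))
        have hnone : (pvPrefs name).reverse.findSome? (PySem.Dict.get? (PySem.Dict.mk d)) = none := by
          rw [List.findSome?_eq_none_iff]
          intro p hp
          cases hg : PySem.Dict.get? (PySem.Dict.mk d) p with
          | none => rfl
          | some v =>
            have hmem := pv_get?_mem d p v hg
            have hsw := (pv_mem_prefs name p).mp (List.mem_reverse.mp hp)
            exact absurd hsw (by simpa using hex (p, v) hmem)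
        rw [hnone, hB]
        rfl
    rw [hmode]
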